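-- pv_equiv track=rewrite | github.com/pypi-data/pypi-mirror-381 | packages/mfcqi/mfcqi-0.0.2-py3-none-any.whl/mfcqi/metrics/cohesion.py | _build_method_connections
-- ===== SOURCE A (Python) =====
-- from collections import defaultdict
--
-- def _build_method_connections(methods: list[tuple[str, set[str]]]) -> dict[str, set[str]]:
--     """Build graph of method connections based on shared instance variables."""
--     connections = defaultdict(set)
--
--     for i, (method1, vars1) in enumerate(methods):
--         for j, (method2, vars2) in enumerate(methods):
--             if i != j and vars1 & vars2:  # Share at least one instance variable
--                 connections[method1].add(method2)
--                 connections[method2].add(method1)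
--
--     return dict(connections)
-- ===== SOURCE B (Python) =====
-- from collections import defaultdict
--
-- def _build_method_connections(methods):
--     """Inverted index variable->method indices, then connect methods per shared
--     variable via a sorted edge set (one pass per unordered pair)."""
--     var_index = defaultdict(list)
--     for i, (_name, variables) in enumerate(methods):
--         for v in variables:
--             var_index[v].append(i)
--     edges = set()
--     for ids in var_index.values():
--         for k, a in enumerate(ids):
--             for b in ids[k + 1:]:
--                 if a != b:
--                     edges.add((a, b))
--     connections = defaultdict(set)
--     for i, j in sorted(edges):
--         m1, m2 = methods[i][0], methods[j][0]
--         connections[m1].add(m2)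
--         connections[m2].add(m1)
--     return dict(connections)
-- ===== Notes on version B (the rewrite author's own statement) =====
-- stated objective: faster
-- what changed: Replaces A's scan of all n^2 ordered index pairs (intersecting the two variable sets for each) with an inverted index variable->method-indices whose per-variable groups generate the shared-variable edge set once; the edges are sorted and each unordered pair is processed a single time.
import Mathlib
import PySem

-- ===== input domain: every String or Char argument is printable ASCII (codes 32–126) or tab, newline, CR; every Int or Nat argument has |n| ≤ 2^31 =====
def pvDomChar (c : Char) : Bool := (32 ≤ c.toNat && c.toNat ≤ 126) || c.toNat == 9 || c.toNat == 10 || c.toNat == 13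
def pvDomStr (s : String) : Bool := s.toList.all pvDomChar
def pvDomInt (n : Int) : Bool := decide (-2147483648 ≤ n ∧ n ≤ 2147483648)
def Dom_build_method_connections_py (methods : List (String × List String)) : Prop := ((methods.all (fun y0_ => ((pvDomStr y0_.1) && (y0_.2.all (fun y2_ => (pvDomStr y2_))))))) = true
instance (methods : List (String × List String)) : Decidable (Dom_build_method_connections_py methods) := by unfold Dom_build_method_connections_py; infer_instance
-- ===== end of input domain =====

-- B replaces A's scan of all ordered index pairs by an inverted index variable→method
-- indices, a sorted edge set of unordered pairs, and one dict update per edge (faster).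

-- ===== PORT A =====
-- shared dict-update helper: the two Python lines 'connections[m1].add(m2); connections[m2].add(m1)'
-- (defaultdict(set) access-then-add = Dict.modify with default ∅); both Pythons contain them verbatim
def bmcAdd (d : PySem.Dict String (PySem.Set String)) (m1 m2 : String) :
    PySem.Dict String (PySem.Set String) :=
  (d.modify m1 [] (fun s => PySem.Set.add s m2)).modify m2 [] (fun s => PySem.Set.add s m1)

def build_method_connections_py (methods : List (String × List String)) : List (String × List String) :=
  ((PySem.List.enumerate methods).foldl (fun d p =>
      (PySem.List.enumerate methods).foldl (fun d q =>
        if p.1 ≠ q.1 ∧ PySem.Set.inter p.2.2 q.2.2 ≠ [] then bmcAdd d p.2.1 q.2.1 else d) d)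
    PySem.Dict.empty).items

-- ===== PORT B =====
def bmcVarIndex (methods : List (String × List String)) : PySem.Dict String (List Int) :=
  (PySem.List.enumerate methods).foldl (fun d p =>
    p.2.2.foldl (fun d v => d.modify v [] (fun l => l ++ [p.1])) d) PySem.Dict.empty

def bmcEdges (methods : List (String × List String)) : PySem.Set (Int × Int) :=
  (bmcVarIndex methods).values.foldl (fun es ids =>
    (PySem.List.enumerate ids).foldl (fun es q =>
      (PySem.List.slice ids (some (q.1 + 1)) none).foldl (fun es b =>
        if q.2 ≠ b then PySem.Set.add es (q.2, b) else es) es) es) []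

def build_method_connections_py_alt (methods : List (String × List String)) : List (String × List String) :=
  ((PySem.List.sorted2 (bmcEdges methods) (fun e => e.1) (fun e => e.2)).foldl
    (fun d e =>
      -- methods[i][0] / methods[j][0]: pyGet? is exact; 'none' is unreachable (edge
      -- indices come from enumerate, hence are in range)
      match PySem.List.pyGet? methods e.1, PySem.List.pyGet? methods e.2 with
      | some p, some q => bmcAdd d p.1 q.1
      | _, _ => d)
    PySem.Dict.empty).items

-- ===== PRECONDITION & SPEC =====
def Spec_build_method_connections_py (methods : List (String × List String)) (out : List (String × List String)) : Prop := out = build_method_connections_py_alt methods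
instance (methods : List (String × List String)) (out : List (String × List String)) : Decidable (Spec_build_method_connections_py methods out) := by unfold Spec_build_method_connections_py; infer_instance

-- ===== CLAIM (what is proved, stated in full; the proofs are below) =====
def Claim_equal_build_method_connections_py : Prop := ∀ (methods : List (String × List String)), Dom_build_method_connections_py methods → Spec_build_method_connections_py methods (build_method_connections_py methods)

-- ===== LEMMAS AND PROOFS =====

abbrev BMCEnt : Type := Int × (String × List String)
abbrev BMCPair : Type := BMCEnt × BMCEnt

def bmcPP (methods : List (String × List String)) : List BMCPair :=
  (PySem.List.enumerate methods).flatMap (fun p => (PySem.List.enumerate methods).map (fun q => (p, q)))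
def bmcQ (methods : List (String × List String)) : List BMCPair :=
  (bmcPP methods).filter (fun x => decide (x.1.1 ≠ x.2.1 ∧ PySem.Set.inter x.1.2.2 x.2.2.2 ≠ []))
def bmcQ' (methods : List (String × List String)) : List BMCPair :=
  (bmcQ methods).filter (fun x => decide (x.1.1 < x.2.1))
def bmcStep (d : PySem.Dict String (PySem.Set String)) (x : BMCPair) :
    PySem.Dict String (PySem.Set String) := bmcAdd d x.1.2.1 x.2.2.1
def bmcLex (x y : BMCPair) : Prop := x.1.1 < y.1.1 ∨ (x.1.1 = y.1.1 ∧ x.2.1 < y.2.1)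
def bmcHas (d : PySem.Dict String (PySem.Set String)) (a b : String) : Prop :=
  b ∈ d.getD a ([] : PySem.Set String)

-- ---- step-function facts ----
lemma bmcAdd_keys_nodup (d : PySem.Dict String (PySem.Set String)) (m1 m2 : String)
    (h : d.keys.Nodup) : (bmcAdd d m1 m2).keys.Nodup := by
  unfold bmcAdd PySem.Dict.modify
  exact PySem.Dict.nodup_keys_insert _ _ _ (PySem.Dict.nodup_keys_insert _ _ _ h)

lemma bmcHas_mono (d : PySem.Dict String (PySem.Set String)) (m1 m2 a b : String)
    (h : bmcHas d a b) : bmcHas (bmcAdd d m1 m2) a b := by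
  unfold bmcHas bmcAdd PySem.Dict.modify at *
  simp only [PySem.Dict.getD_insert]
  split_ifs with h1 h2 <;> simp_all [PySem.Set.mem_add]

lemma bmcHas_step (d : PySem.Dict String (PySem.Set String)) (m1 m2 : String) :
    bmcHas (bmcAdd d m1 m2) m1 m2 ∧ bmcHas (bmcAdd d m1 m2) m2 m1 := by
  unfold bmcHas bmcAdd PySem.Dict.modify
  simp only [PySem.Dict.getD_insert]
  by_cases h : m1 = m2 <;> split_ifs <;> simp_all [PySem.Set.mem_add]

lemma bmc_insert_self {d : PySem.Dict String (PySem.Set String)} {k : String}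
    {v : PySem.Set String} (hnd : d.keys.Nodup) (h : d.get? k = some v) :
    d.insert k v = d := by
  have hc : d.contains k = true := by rw [PySem.Dict.contains_eq_isSome_get?, h]; rfl
  apply PySem.Dict.ext
  rw [PySem.Dict.items_insert_of_contains d v hc]
  conv_rhs => rw [← List.map_id d.items]
  apply List.map_congr_left
  intro p hp
  by_cases hk : p.1 = k
  · have : d.get? k = some p.2 := by
      have : (p.1, p.2) ∈ d.items := by simpa using hp
      rw [← hk]; exact PySem.Dict.get?_of_mem_items d this hnd
    rw [h] at this
    have hv : v = p.2 := by injection this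
    subst hv
    simp [hk]
    exact Prod.ext hk.symm rfl
  · simp [hk]

lemma bmcAdd_noop (d : PySem.Dict String (PySem.Set String)) (m1 m2 : String)
    (hnd : d.keys.Nodup) (h1 : bmcHas d m1 m2) (h2 : bmcHas d m2 m1) :
    bmcAdd d m1 m2 = d := by
  unfold bmcHas at h1 h2
  have step : ∀ (a b : String), b ∈ d.getD a [] →
      d.modify a [] (fun s => PySem.Set.add s b) = d := by
    intro a b hb
    rw [PySem.Dict.getD_eq_get?_getD] at hb
    cases hg : d.get? a with
    | none => rw [hg] at hb; simp at hb
    | some s =>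
      rw [hg] at hb; simp at hb
      unfold PySem.Dict.modify
      rw [PySem.Dict.getD_eq_get?_getD, hg]
      simp only [Option.getD_some]
      rw [PySem.Set.add_of_mem hb]
      exact bmc_insert_self hnd hg
  unfold bmcAdd
  rw [step m1 m2 h1, step m2 m1 h2]

-- ---- the swap-skipping argument: A's second visit of each unordered pair is a no-op ----
lemma bmc_foldl_skip (L : List BMCPair) (d : PySem.Dict String (PySem.Set String))
    (hnd : d.keys.Nodup) (hsort : L.Pairwise bmcLex)
    (hne : ∀ x ∈ L, x.1.1 ≠ x.2.1)
    (hsym : ∀ x ∈ L, x.2.1 < x.1.1 →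
      ((x.2, x.1) ∈ L ∨ (bmcHas d x.1.2.1 x.2.2.1 ∧ bmcHas d x.2.2.1 x.1.2.1))) :
    L.foldl bmcStep d = (L.filter (fun x => decide (x.1.1 < x.2.1))).foldl bmcStep d := by
  induction L generalizing d with
  | nil => rfl
  | cons x t ih =>
    rw [List.pairwise_cons] at hsort
    obtain ⟨hx, hsortt⟩ := hsort
    rcases lt_trichotomy x.1.1 x.2.1 with hlt | heq | hgt
    · -- kept: the step fires, head stays in the filter
      rw [List.filter_cons_of_pos (by simpa using hlt)]
      simp only [List.foldl_cons]
      apply ih (bmcStep d x) (bmcAdd_keys_nodup _ _ _ hnd) hsortt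
        (fun y hy => hne y (List.mem_cons_of_mem _ hy))
      intro y hy hy21
      rcases hsym y (List.mem_cons_of_mem _ hy) hy21 with hmem | ⟨ha, hb⟩
      · rcases List.mem_cons.mp hmem with heq | hmem'
        · -- the swap of y is the head x: the step just established both directions
          right
          have h1 : y.2 = x.1 := congrArg Prod.fst heq
          have h2 : y.1 = x.2 := congrArg Prod.snd heq
          rw [h1, h2]
          exact ⟨(bmcHas_step d _ _).2, (bmcHas_step d _ _).1⟩
        · exact Or.inl hmem'
      · exact Or.inr ⟨bmcHas_mono _ _ _ _ _ ha, bmcHas_mono _ _ _ _ _ hb⟩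
    · exact absurd heq (hne x (List.mem_cons_self))
    · -- dropped: the swap was already processed, so this step is a no-op
      rw [List.filter_cons_of_neg (by simpa using not_lt.mpr (le_of_lt hgt))]
      have hnoop : bmcStep d x = d := by
        rcases hsym x List.mem_cons_self hgt with hmem | ⟨ha, hb⟩
        · rcases List.mem_cons.mp hmem with heq | hmem'
          · exfalso
            have : x.2.1 = x.1.1 := congrArg (fun z => Prod.fst (Prod.fst z)) heq
            exact absurd this (ne_of_lt hgt)
          · exfalso
            have := hx _ hmem'
            unfold bmcLex at this
            rcases this with h | ⟨h1, h2⟩ <;> simp_all <;> omega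
        · exact bmcAdd_noop d _ _ hnd ha hb
      simp only [List.foldl_cons, hnoop]
      apply ih d hnd hsortt (fun y hy => hne y (List.mem_cons_of_mem _ hy))
      intro y hy hy21
      rcases hsym y (List.mem_cons_of_mem _ hy) hy21 with hmem | hh
      · rcases List.mem_cons.mp hmem with heq | hmem'
        · exfalso
          have hlexxy := hx y hy
          unfold bmcLex at hlexxy
          have h1 : x.1.1 = y.2.1 := by rw [← heq]
          have h2 : x.2.1 = y.1.1 := by rw [← heq]
          rcases hlexxy with h | ⟨ha, hb⟩ <;> omega
        · exact Or.inl hmem'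
      · exact Or.inr hh

-- ---- A equals the fold over the fired pairs, then over the i<j fired pairs ----
lemma bmcA_eq_Q (methods : List (String × List String)) :
    build_method_connections_py methods = ((bmcQ methods).foldl bmcStep PySem.Dict.empty).items := by
  unfold build_method_connections_py bmcQ bmcPP
  rw [← PySem.List.foldl_ite_eq_foldl_filter]
  rw [List.flatMap_def, List.foldl_flatten, List.foldl_map]
  simp only [List.foldl_map]
  rfl

lemma bmc_mem_PP (methods : List (String × List String)) (x : BMCPair) :
    x ∈ bmcPP methods ↔ x.1 ∈ PySem.List.enumerate methods ∧ x.2 ∈ PySem.List.enumerate methods := by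
  unfold bmcPP
  simp only [List.mem_flatMap, List.mem_map]
  constructor
  · rintro ⟨p, hp, q, hq, rfl⟩; exact ⟨hp, hq⟩
  · rintro ⟨h1, h2⟩; exact ⟨x.1, h1, x.2, h2, rfl⟩

lemma bmcPP_pairwise (methods : List (String × List String)) :
    (bmcPP methods).Pairwise bmcLex := by
  unfold bmcPP
  rw [List.pairwise_flatMap]
  constructor
  · intro p _
    rw [List.pairwise_map]
    exact (PySem.List.pairwise_lt_enumerate methods 0).imp (fun h => Or.inr ⟨rfl, h⟩)
  · apply (PySem.List.pairwise_lt_enumerate methods 0).imp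
    intro p1 p2 h x hx y hy
    rw [List.mem_map] at hx hy
    obtain ⟨q1, _, rfl⟩ := hx
    obtain ⟨q2, _, rfl⟩ := hy
    exact Or.inl h

lemma bmcQ_pairwise (methods : List (String × List String)) :
    (bmcQ methods).Pairwise bmcLex :=
  (bmcPP_pairwise methods).filter _

lemma bmc_inter_ne_nil_iff (s t : PySem.Set String) :
    PySem.Set.inter s t ≠ [] ↔ ∃ v, v ∈ s ∧ v ∈ t := by
  constructor
  · intro h
    rcases List.exists_mem_of_ne_nil _ h with ⟨v, hv⟩
    rw [PySem.Set.mem_inter] at hv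
    exact ⟨v, hv⟩
  · rintro ⟨v, h1, h2⟩ hnil
    have := (PySem.Set.mem_inter s t v).mpr ⟨h1, h2⟩
    rw [hnil] at this
    simp at this

lemma bmcQ_swap (methods : List (String × List String)) (x : BMCPair)
    (hx : x ∈ bmcQ methods) : (x.2, x.1) ∈ bmcQ methods := by
  unfold bmcQ at *
  rw [List.mem_filter] at hx ⊢
  obtain ⟨hpp, hf⟩ := hx
  rw [decide_eq_true_iff] at hf
  obtain ⟨hne, hint⟩ := hf
  rw [bmc_mem_PP] at hpp
  refine ⟨(bmc_mem_PP methods _).mpr ⟨hpp.2, hpp.1⟩, ?_⟩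
  rw [decide_eq_true_iff]
  constructor
  · exact fun h => hne h.symm
  · rw [bmc_inter_ne_nil_iff] at hint ⊢
    obtain ⟨v, h1, h2⟩ := hint
    exact ⟨v, h2, h1⟩

lemma bmc_mem_Q_ne (methods : List (String × List String)) (x : BMCPair)
    (hx : x ∈ bmcQ methods) : x.1.1 ≠ x.2.1 := by
  unfold bmcQ at hx
  rw [List.mem_filter, decide_eq_true_iff] at hx
  exact hx.2.1

lemma bmcA_eq_Q' (methods : List (String × List String)) :
    build_method_connections_py methods = ((bmcQ' methods).foldl bmcStep PySem.Dict.empty).items := by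
  rw [bmcA_eq_Q]
  unfold bmcQ'
  congr 1
  apply bmc_foldl_skip _ _ PySem.Dict.nodup_keys_empty (bmcQ_pairwise methods)
    (bmc_mem_Q_ne methods)
  intro x hx _
  exact Or.inl (bmcQ_swap methods x hx)

-- ---- B-side: characterize the edge set ----
lemma bmc_mem_drop (l : List Int) (n : Nat) (b : Int) :
    b ∈ l.drop n ↔ ∃ m, ∃ h : n + m < l.length, l[n + m] = b := by
  constructor
  · intro h
    obtain ⟨j, hj, he⟩ := List.getElem_of_mem h
    refine ⟨j, ?_, ?_⟩
    · have := hj; rw [List.length_drop] at this; omega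
    · rw [← List.getElem_drop (h := hj)] at *; exact he
  · rintro ⟨m, hm, rfl⟩
    have hm' : m < (l.drop n).length := by rw [List.length_drop]; omega
    have := List.getElem_mem hm'
    rwa [List.getElem_drop] at this

lemma bmc_mem_foldl_step {β γ : Type} [BEq γ] (g : PySem.Set γ → β → PySem.Set γ)
    (C : β → γ → Prop)
    (hg : ∀ es x y, y ∈ g es x ↔ y ∈ es ∨ C x y) :
    ∀ (L : List β) (es : PySem.Set γ) (y : γ),
      y ∈ L.foldl g es ↔ y ∈ es ∨ ∃ x ∈ L, C x y := by
  intro L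
  induction L with
  | nil => simp
  | cons x t ih =>
    intro es y
    rw [List.foldl_cons, ih, hg]
    simp only [List.mem_cons]
    constructor
    · rintro ((h | h) | ⟨z, hz, hc⟩)
      · exact Or.inl h
      · exact Or.inr ⟨x, Or.inl rfl, h⟩
      · exact Or.inr ⟨z, Or.inr hz, hc⟩
    · rintro (h | ⟨z, (rfl | hz), hc⟩)
      · exact Or.inl (Or.inl h)
      · exact Or.inl (Or.inr hc)
      · exact Or.inr ⟨z, hz, hc⟩

lemma bmc_nodup_foldl {β γ : Type} (g : PySem.Set γ → β → PySem.Set γ)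
    (hg : ∀ es x, es.Nodup → (g es x).Nodup) :
    ∀ (L : List β) (es : PySem.Set γ), es.Nodup → (L.foldl g es).Nodup := by
  intro L
  induction L with
  | nil => exact fun es h => h
  | cons x t ih => exact fun es h => ih _ (hg es x h)

lemma bmc_mem_edges_raw (methods : List (String × List String)) (e : Int × Int) :
    e ∈ bmcEdges methods ↔
      ∃ ids ∈ (bmcVarIndex methods).values, ∃ q ∈ PySem.List.enumerate ids,
        ∃ b ∈ PySem.List.slice ids (some (q.1 + 1)) none, q.2 ≠ b ∧ e = (q.2, b) := by
  unfold bmcEdges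
  rw [bmc_mem_foldl_step _
    (fun ids y => ∃ q ∈ PySem.List.enumerate ids,
        ∃ b ∈ PySem.List.slice ids (some (q.1 + 1)) none, q.2 ≠ b ∧ y = (q.2, b)) ?_ _ [] e]
  · simp
  · intro es ids y
    rw [bmc_mem_foldl_step _
      (fun q y => ∃ b ∈ PySem.List.slice ids (some (q.1 + 1)) none, q.2 ≠ b ∧ y = (q.2, b)) ?_]
    intro es q y
    rw [bmc_mem_foldl_step _ (fun b y => q.2 ≠ b ∧ y = (q.2, b)) ?_]
    intro es b y
    split_ifs with h
    · rw [PySem.Set.mem_add]; tauto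
    · tauto

lemma bmc_edges_nodup (methods : List (String × List String)) :
    (bmcEdges methods).Nodup := by
  unfold bmcEdges
  apply bmc_nodup_foldl _ ?_ _ _ List.nodup_nil
  intro es ids h
  apply bmc_nodup_foldl _ ?_ _ _ h
  intro es q h
  apply bmc_nodup_foldl _ ?_ _ _ h
  intro es b h
  split_ifs
  · exact PySem.Set.nodup_add _ _ h
  · exact h

-- for a ≤-sorted ids list, the generated pairs are exactly the strictly increasing pairs of members
lemma bmc_pairs_of_sorted (ids : List Int) (hpw : ids.Pairwise (· ≤ ·)) (e : Int × Int) :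
    (∃ q ∈ PySem.List.enumerate ids, ∃ b ∈ PySem.List.slice ids (some (q.1 + 1)) none,
        q.2 ≠ b ∧ e = (q.2, b))
      ↔ (e.1 < e.2 ∧ e.1 ∈ ids ∧ e.2 ∈ ids) := by
  rw [List.pairwise_iff_getElem] at hpw
  constructor
  · rintro ⟨q, hq, b, hb, hne, rfl⟩
    rw [PySem.List.mem_enumerate_iff] at hq
    obtain ⟨k, hk, rfl⟩ := hq
    have hsl : PySem.List.slice ids (some ((0 : Int) + k + 1)) none = ids.drop (k + 1) := by
      rw [PySem.List.slice_from _ (by positivity)]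
      congr 1
      omega
    rw [hsl, bmc_mem_drop] at hb
    obtain ⟨m, hm, rfl⟩ := hb
    exact ⟨lt_of_le_of_ne (hpw k (k+1+m) hk hm (by omega)) hne, List.getElem_mem hk, List.getElem_mem hm⟩
  · rintro ⟨hlt, h1, h2⟩
    obtain ⟨k, hk, hek⟩ := List.getElem_of_mem h1
    obtain ⟨l, hl, hel⟩ := List.getElem_of_mem h2
    have hkl : k < l := by
      rcases lt_trichotomy k l with h | h | h
      · exact h
      · exfalso; subst h; rw [hel] at hek; exact absurd hek (ne_of_lt hlt).symm
      · exfalso; have := hpw l k hl hk h; rw [hek, hel] at this; omega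
    refine ⟨((0:Int) + (k:Int), e.1), ?_, e.2, ?_, ne_of_lt hlt, by simp⟩
    · rw [PySem.List.mem_enumerate_iff]; exact ⟨k, hk, by rw [hek]⟩
    · have hsl : PySem.List.slice ids (some ((0 : Int) + k + 1)) none = ids.drop (k + 1) := by
        rw [PySem.List.slice_from _ (by positivity)]
        congr 1
        omega
      rw [hsl, bmc_mem_drop]
      exact ⟨l - (k+1), by omega, by rw [← hel]; congr 1; omega⟩

-- ---- B-side: the inverted index ----
def bmcVL (methods : List (String × List String)) : List (String × Int) :=
  (PySem.List.enumerate methods).flatMap (fun p => p.2.2.map (fun v => (v, p.1)))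

lemma bmcVarIndex_eq (methods : List (String × List String)) :
    bmcVarIndex methods
      = (bmcVL methods).foldl (fun d p => d.modify p.1 [] (fun l => l ++ [p.2])) PySem.Dict.empty := by
  unfold bmcVarIndex bmcVL
  rw [List.flatMap_def, List.foldl_flatten, List.foldl_map]
  simp only [List.foldl_map]

lemma bmc_keys_varIndex (methods : List (String × List String)) :
    (bmcVarIndex methods).keys = PySem.Set.ofList ((bmcVL methods).map (fun p => p.1)) := by
  rw [bmcVarIndex_eq]
  rw [PySem.Dict.keys_foldl_modify_key (bmcVL methods) (fun p => p.1) [] (fun _ p l => l ++ [p.2])]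
  exact PySem.Set.update_nil_left _

lemma bmc_nodup_keys_varIndex (methods : List (String × List String)) :
    (bmcVarIndex methods).keys.Nodup := by
  rw [bmcVarIndex_eq]
  exact PySem.Dict.nodup_keys_foldl_modify_key (bmcVL methods) (fun p => p.1) [] (fun _ p l => l ++ [p.2]) _ PySem.Dict.nodup_keys_empty

def bmcIds (methods : List (String × List String)) (v : String) : List Int :=
  (bmcVarIndex methods).getD v []

lemma bmc_ids_eq (methods : List (String × List String)) (v : String) :
    bmcIds methods v = ((bmcVL methods).filter (fun p => p.1 == v)).map (fun p => p.2) := by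
  unfold bmcIds
  rw [bmcVarIndex_eq, PySem.Dict.getD_foldl_modify_append]
  simp

lemma bmc_mem_ids (methods : List (String × List String)) (v : String) (i : Int) :
    i ∈ bmcIds methods v ↔ ∃ p ∈ PySem.List.enumerate methods, v ∈ p.2.2 ∧ i = p.1 := by
  rw [bmc_ids_eq]
  simp only [List.mem_map, List.mem_filter, bmcVL, List.mem_flatMap, beq_iff_eq]
  constructor
  · rintro ⟨⟨v', i'⟩, ⟨⟨p, hp, hvp⟩, rfl⟩, rfl⟩
    obtain ⟨w, hw, heq⟩ := hvp
    have h1 : w = v' := congrArg Prod.fst heq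
    have h2 : p.1 = i' := congrArg Prod.snd heq
    exact ⟨p, hp, h1 ▸ hw, h2.symm⟩
  · rintro ⟨p, hp, hv, rfl⟩
    exact ⟨(v, p.1), ⟨⟨p, hp, ⟨v, hv, rfl⟩⟩, rfl⟩, rfl⟩

lemma bmc_ids_pairwise (methods : List (String × List String)) (v : String) :
    (bmcIds methods v).Pairwise (· ≤ ·) := by
  rw [bmc_ids_eq]
  rw [List.pairwise_map]
  apply List.Pairwise.filter
  unfold bmcVL
  rw [List.pairwise_flatMap]
  constructor
  · intro p _
    rw [List.pairwise_map]
    exact List.pairwise_of_forall (fun _ _ => le_refl _) -- within a method: same index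
  · apply (PySem.List.pairwise_lt_enumerate methods 0).imp
    intro p1 p2 h x hx y hy
    rw [List.mem_map] at hx hy
    obtain ⟨_, _, rfl⟩ := hx
    obtain ⟨_, _, rfl⟩ := hy
    exact le_of_lt h

lemma bmc_mem_keys_varIndex (methods : List (String × List String)) (v : String) :
    v ∈ (bmcVarIndex methods).keys ↔ ∃ p ∈ PySem.List.enumerate methods, v ∈ p.2.2 := by
  rw [bmc_keys_varIndex, PySem.Set.mem_ofList]
  simp only [List.mem_map, bmcVL, List.mem_flatMap]
  constructor
  · rintro ⟨⟨v', i'⟩, ⟨p, hp, hvp⟩, rfl⟩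
    obtain ⟨w, hw, heq⟩ := hvp
    have h1 : w = v' := congrArg Prod.fst heq
    exact ⟨p, hp, h1 ▸ hw⟩
  · rintro ⟨p, hp, hv⟩
    exact ⟨(v, p.1), ⟨p, hp, ⟨v, hv, rfl⟩⟩, rfl⟩

-- ---- the full edge-set characterization ----
lemma bmc_mem_edges (methods : List (String × List String)) (e : Int × Int) :
    e ∈ bmcEdges methods ↔
      (e.1 < e.2 ∧ ∃ p ∈ PySem.List.enumerate methods, ∃ q ∈ PySem.List.enumerate methods,
        p.1 = e.1 ∧ q.1 = e.2 ∧ ∃ v, v ∈ p.2.2 ∧ v ∈ q.2.2) := by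
  rw [bmc_mem_edges_raw]
  have hvals : (bmcVarIndex methods).values
      = (bmcVarIndex methods).keys.map (fun k => bmcIds methods k) :=
    PySem.Dict.values_eq_map_keys _ (bmc_nodup_keys_varIndex methods) []
  rw [hvals]
  constructor
  · rintro ⟨ids, hids, hrest⟩
    rw [List.mem_map] at hids
    obtain ⟨v, hv, rfl⟩ := hids
    rw [bmc_pairs_of_sorted _ (bmc_ids_pairwise methods v)] at hrest
    obtain ⟨hlt, h1, h2⟩ := hrest
    rw [bmc_mem_ids] at h1 h2
    obtain ⟨p, hp, hvp, hep⟩ := h1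
    obtain ⟨q, hq, hvq, heq⟩ := h2
    exact ⟨hlt, p, hp, q, hq, hep.symm, heq.symm, v, hvp, hvq⟩
  · rintro ⟨hlt, p, hp, q, hq, hep, heq, v, hvp, hvq⟩
    refine ⟨bmcIds methods v, List.mem_map.mpr ⟨v, ?_, rfl⟩, ?_⟩
    · exact (bmc_mem_keys_varIndex methods v).mpr ⟨p, hp, hvp⟩
    · rw [bmc_pairs_of_sorted _ (bmc_ids_pairwise methods v)]
      exact ⟨hlt, (bmc_mem_ids methods v e.1).mpr ⟨p, hp, hvp, hep.symm⟩,
        (bmc_mem_ids methods v e.2).mpr ⟨q, hq, hvq, heq.symm⟩⟩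

-- ---- the sorted edge list is exactly the index-pair image of the i<j fired pairs ----
lemma bmc_sorted2_eq_sorted (xs : List (Int × Int)) :
    PySem.List.sorted2 xs (fun e => e.1) (fun e => e.2)
      = PySem.List.sorted xs (fun e => toLex e) := by
  rw [PySem.List.sorted_eq_foldl_insertBy]
  unfold PySem.List.sorted2
  simp only [if_neg (by simp : ¬ (false = true))]
  have hfun : (fun (a b : Int × Int) => decide (a.1 < b.1) || (!decide (b.1 < a.1) && decide (a.2 < b.2)))
      = (fun (a b : Int × Int) => decide (toLex a < toLex b)) := by
    funext a b
    rcases lt_trichotomy a.1 b.1 with h | h | h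
    · simp [Prod.Lex.lt_iff, h]
    · simp [Prod.Lex.lt_iff, h]
    · have h1 : ¬ a.1 < b.1 := by omega
      have h2 : a.1 ≠ b.1 := by omega
      simp [Prod.Lex.lt_iff, h, h1, h2]
  exact congrArg (fun f => xs.foldl (fun acc x => PySem.List.insertBy f x acc) []) hfun

lemma bmcQ'_pairwise (methods : List (String × List String)) :
    (bmcQ' methods).Pairwise bmcLex :=
  (bmcQ_pairwise methods).filter _

lemma bmc_mem_Q' (methods : List (String × List String)) (x : BMCPair) :
    x ∈ bmcQ' methods ↔ x.1 ∈ PySem.List.enumerate methods ∧ x.2 ∈ PySem.List.enumerate methods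
      ∧ x.1.1 < x.2.1 ∧ ∃ v, v ∈ x.1.2.2 ∧ v ∈ x.2.2.2 := by
  unfold bmcQ' bmcQ
  rw [List.mem_filter, List.mem_filter, bmc_mem_PP]
  simp only [decide_eq_true_iff]
  rw [bmc_inter_ne_nil_iff]
  constructor
  · rintro ⟨⟨⟨h1, h2⟩, _, hint⟩, hlt⟩
    exact ⟨h1, h2, hlt, hint⟩
  · rintro ⟨h1, h2, hlt, hint⟩
    exact ⟨⟨⟨h1, h2⟩, ne_of_lt hlt, hint⟩, hlt⟩

lemma bmc_sorted_edges (methods : List (String × List String)) :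
    PySem.List.sorted2 (bmcEdges methods) (fun e => e.1) (fun e => e.2)
      = (bmcQ' methods).map (fun x => (x.1.1, x.2.1)) := by
  rw [bmc_sorted2_eq_sorted]
  apply PySem.List.sorted_eq_of_perm_of_pairwise_lt
  · -- the target is a permutation of the edge set: both Nodup with the same members
    have hpwlex : ((bmcQ' methods).map (fun x => (x.1.1, x.2.1))).Pairwise
        (fun a b => a.1 < b.1 ∨ (a.1 = b.1 ∧ a.2 < b.2)) := by
      rw [List.pairwise_map]
      exact (bmcQ'_pairwise methods).imp (fun h => h)
    have hnd : ((bmcQ' methods).map (fun x => (x.1.1, x.2.1))).Nodup := by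
      rw [List.nodup_iff_pairwise_ne]
      apply hpwlex.imp
      rintro a b (h | ⟨h1, h2⟩) heq
      · rw [heq] at h; omega
      · rw [heq] at h2; omega
    rw [List.perm_ext_iff_of_nodup hnd (bmc_edges_nodup methods)]
    intro e
    rw [bmc_mem_edges]
    simp only [List.mem_map]
    constructor
    · rintro ⟨x, hx, rfl⟩
      rw [bmc_mem_Q'] at hx
      obtain ⟨h1, h2, hlt, hint⟩ := hx
      exact ⟨hlt, x.1, h1, x.2, h2, rfl, rfl, hint⟩
    · rintro ⟨hlt, p, hp, q, hq, hep, heq, hint⟩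
      refine ⟨(p, q), ?_, by simp only []; rw [hep, heq]⟩
      rw [bmc_mem_Q']
      exact ⟨hp, hq, by rw [hep, heq]; exact hlt, hint⟩
  · rw [List.pairwise_map]
    apply (bmcQ'_pairwise methods).imp
    intro a b h
    rw [Prod.Lex.lt_iff]
    exact h

-- ---- final assembly ----
lemma bmcB_eq_Q' (methods : List (String × List String)) :
    build_method_connections_py_alt methods = ((bmcQ' methods).foldl bmcStep PySem.Dict.empty).items := by
  unfold build_method_connections_py_alt
  rw [bmc_sorted_edges, List.foldl_map]
  congr 1
  apply PySem.List.foldl_congr_mem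
  intro d x hx
  rw [bmc_mem_Q'] at hx
  obtain ⟨h1, h2, _, _⟩ := hx
  rw [PySem.List.mem_enumerate_iff] at h1 h2
  obtain ⟨k1, hk1, he1⟩ := h1
  obtain ⟨k2, hk2, he2⟩ := h2
  have g1 : PySem.List.pyGet? methods x.1.1 = some x.1.2 := by
    rw [he1]; simp [PySem.List.pyGet?_natCast, List.getElem?_eq_getElem hk1]
  have g2 : PySem.List.pyGet? methods x.2.1 = some x.2.2 := by
    rw [he2]; simp [PySem.List.pyGet?_natCast, List.getElem?_eq_getElem hk2]
  rw [g1, g2]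
  rfl

-- ===== VERDICT (by name: the statement is the Claim_ definition above) =====
theorem build_method_connections_py_spec : Claim_equal_build_method_connections_py := by
  intro methods _
  unfold Spec_build_method_connections_py
  rw [bmcA_eq_Q' methods, bmcB_eq_Q' methods]
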